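-- pv_equiv track=rewrite | github.com/bssrdf/pyleet | P/ProfitableSchemes.py | profitableSchemesStateCompression
-- ===== SOURCE A (Python) =====
-- from typing import List
--
-- def profitableSchemesStateCompression(n: int, minProfit: int,
--                 group: List[int], profit: List[int]) -> int:
--     m, p, MOD, res = len(profit), minProfit, 10**9+7, 0
--     dp = [[0]*(p+1) for _ in range(n+1)]
--     dp[0][0] = 1
--     for k in range(1, m+1):
--         g, pr = group[k-1], profit[k-1]
--         for i in range(n, g-1, -1):
--             for j in range(p, -1, -1):
--                 dp[i][j] = (dp[i][j] + dp[i-g][max(0,j-pr)])%MOD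
--     for i in range(n+1):
--         res = (res + dp[i][p])%MOD
--     return res
-- ===== SOURCE B (Python) =====
-- from typing import List
--
-- def profitableSchemesStateCompression(n: int, minProfit: int,
--                 group: List[int], profit: List[int]) -> int:
--     MOD = 10**9 + 7
--     m = len(profit)
--     items = list(zip(group, profit))[:m]
--     memo = {}
--
--     def dfs(k, left, need):
--         if k == m:
--             return 1 if need == 0 else 0
--         key = (k, left, need)
--         if key in memo:
--             return memo[key]
--         g, pr = items[k]
--         res = dfs(k + 1, left, need)
--         if g <= left:
--             res = (res + dfs(k + 1, left - g, max(0, need - pr))) % MOD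
--         memo[key] = res
--         return res
--
--     return dfs(0, n, minProfit)
-- ===== Notes on version B (the rewrite author's own statement) =====
-- stated objective: alternative
-- what changed: Replaces the dense bottom-up 2-D table updated in place over all (members, profit) cells for every item by a top-down memoized recursion over the item index that only evaluates reachable (k, membersLeft, profitNeeded) states.
-- outside the precondition, e.g. on profitableSchemesStateCompression(0, 0, [5], [-1]): A returns 1, B returns 1; on profitableSchemesStateCompression(1, 0, [1, -3], [1]): A returns 2, B returns 2
import Mathlib
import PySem

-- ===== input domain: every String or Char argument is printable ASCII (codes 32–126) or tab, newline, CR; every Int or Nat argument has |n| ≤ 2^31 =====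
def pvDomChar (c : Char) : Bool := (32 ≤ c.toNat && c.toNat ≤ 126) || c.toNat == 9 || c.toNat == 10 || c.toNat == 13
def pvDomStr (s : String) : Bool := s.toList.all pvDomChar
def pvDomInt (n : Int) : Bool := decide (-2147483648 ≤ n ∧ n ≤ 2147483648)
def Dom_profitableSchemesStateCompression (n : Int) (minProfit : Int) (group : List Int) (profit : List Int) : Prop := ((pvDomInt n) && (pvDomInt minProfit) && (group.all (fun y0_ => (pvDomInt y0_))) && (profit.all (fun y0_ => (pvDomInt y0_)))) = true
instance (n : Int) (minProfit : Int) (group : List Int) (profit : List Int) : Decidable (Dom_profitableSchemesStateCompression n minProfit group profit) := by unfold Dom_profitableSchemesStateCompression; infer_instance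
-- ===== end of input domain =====

-- B replaces A's dense bottom-up 2-D table (always n·minProfit·m cell updates) by a
-- top-down memoized recursion over the item index that only evaluates reachable
-- (k, membersLeft, profitNeeded) states (objective: alternative decomposition).

-- ===== PORT A =====
-- dp[i][j] read/write helpers; exact on Pre_ (there every index Python uses is nonnegative and in range)
def pvGet2 (dp : List (List Int)) (i j : Int) : Int := (dp.getD i.toNat []).getD j.toNat 0

def pvSet2 (dp : List (List Int)) (i j : Int) (v : Int) : List (List Int) :=
  dp.set i.toNat ((dp.getD i.toNat []).set j.toNat v)

def profitableSchemesStateCompression (n : Int) (minProfit : Int) (group : List Int) (profit : List Int) : Int :=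
  let m : Int := (profit.length : Int)
  let p := minProfit
  let MOD : Int := 1000000007
  let dp0 : List (List Int) := List.replicate (n+1).toNat (List.replicate (p+1).toNat 0)
  let dp1 := pvSet2 dp0 0 0 1
  let dp2 := (PySem.List.pyRange 1 (m+1) 1).foldl (fun dp k =>
      let g := PySem.List.pyGetD group (k-1) 0
      let pr := PySem.List.pyGetD profit (k-1) 0
      (PySem.List.pyRange n (g-1) (-1)).foldl (fun dp i =>
        (PySem.List.pyRange p (-1) (-1)).foldl (fun dp j =>
          pvSet2 dp i j (PySem.Int.mod (pvGet2 dp i j + pvGet2 dp (i-g) (max 0 (j-pr))) MOD)) dp) dp) dp1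
  (PySem.List.pyRange 0 (n+1) 1).foldl (fun res i => PySem.Int.mod (res + pvGet2 dp2 i p) MOD) 0

-- ===== PORT B =====
-- items = list(zip(group, profit))[:m]
def pvItems (group profit : List Int) : List (Int × Int) := (group.zip profit).take profit.length

-- dfs(k, left, need) with memo dict keyed (k, left, need); the list argument is items[k:]
def pvDfsB (MOD : Int) : List (Int × Int) → Int → Int → Int → PySem.Dict (Int × Int × Int) Int → Int × PySem.Dict (Int × Int × Int) Int
  | [], _, _, need, memo => (if need == 0 then 1 else 0, memo)
  | (g, pr) :: rest, k, left, need, memo =>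
      match memo.get? (k, left, need) with
      | some v => (v, memo)
      | none =>
          let s1 := pvDfsB MOD rest (k+1) left need memo
          if g ≤ left then
            let s2 := pvDfsB MOD rest (k+1) (left - g) (max 0 (need - pr)) s1.2
            let res := PySem.Int.mod (s1.1 + s2.1) MOD
            (res, s2.2.insert (k, left, need) res)
          else
            (s1.1, s1.2.insert (k, left, need) s1.1)

def profitableSchemesStateCompression_alt (n : Int) (minProfit : Int) (group : List Int) (profit : List Int) : Int :=
  (pvDfsB 1000000007 (pvItems group profit) 0 n minProfit PySem.Dict.empty).1

-- ===== PRECONDITION & SPEC =====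
-- Pre_ is the problem's natural domain (nonnegative counts and profits, a group size for
-- every profit); outside it A raises IndexError except in degenerate corners where the
-- offending negative entry is never read by A (a negative profit whose group size exceeds n,
-- or a negative group entry beyond index len(profit)), where both programs agree anyway.
def Pre_profitableSchemesStateCompression (n : Int) (minProfit : Int) (group : List Int) (profit : List Int) : Prop :=
  0 ≤ n ∧ 0 ≤ minProfit ∧ profit.length ≤ group.length ∧ (∀ g ∈ group, 0 ≤ g) ∧ (∀ q ∈ profit, 0 ≤ q)

instance (n : Int) (minProfit : Int) (group : List Int) (profit : List Int) : Decidable (Pre_profitableSchemesStateCompression n minProfit group profit) := by unfold Pre_profitableSchemesStateCompression; infer_instance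

def pvWitness_profitableSchemesStateCompression : Int × Int × List Int × List Int := (2, 3, [2, 2], [2, 3])

def Spec_profitableSchemesStateCompression (n : Int) (minProfit : Int) (group : List Int) (profit : List Int) (out : Int) : Prop := out = profitableSchemesStateCompression_alt n minProfit group profit
instance (n : Int) (minProfit : Int) (group : List Int) (profit : List Int) (out : Int) : Decidable (Spec_profitableSchemesStateCompression n minProfit group profit out) := by unfold Spec_profitableSchemesStateCompression; infer_instance

-- ===== CLAIM (what is proved, stated in full; the proofs are below) =====
def Claim_equal_profitableSchemesStateCompression : Prop := ∀ (n : Int) (minProfit : Int) (group : List Int) (profit : List Int), Dom_profitableSchemesStateCompression n minProfit group profit → Pre_profitableSchemesStateCompression n minProfit group profit → Spec_profitableSchemesStateCompression n minProfit group profit (profitableSchemesStateCompression n minProfit group profit)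

-- ===== LEMMAS AND PROOFS =====

-- the exact (unmodded, uncapped) subset count with capacity `left` and profit target `need`
def pvCnt : List (Int × Int) → Int → Int → Int
  | [], left, need => if 0 ≤ left ∧ need ≤ 0 then 1 else 0
  | (g, pr) :: rest, left, need => pvCnt rest left need + pvCnt rest (left - g) (need - pr)

-- the exact count with member total exactly `i`
def pvNex : List (Int × Int) → Int → Int → Int
  | [], i, need => if i = 0 ∧ need ≤ 0 then 1 else 0
  | (g, pr) :: rest, i, need => pvNex rest i need + pvNex rest (i - g) (need - pr)

-- the memo-free value of B's recursion
def pvPure : List (Int × Int) → Int → Int → Int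
  | [], _, need => if need == 0 then 1 else 0
  | (g, pr) :: rest, left, need =>
      let r1 := pvPure rest left need
      if g ≤ left then PySem.Int.mod (r1 + pvPure rest (left - g) (max 0 (need - pr))) 1000000007 else r1

def pvOk (l : List (Int × Int)) : Prop := ∀ x ∈ l, 0 ≤ x.1 ∧ 0 ≤ x.2

theorem pvCnt_neg_left (l : List (Int × Int)) (hl : pvOk l) (left need : Int) (h : left < 0) :
    pvCnt l left need = 0 := by
  induction l generalizing left need with
  | nil => simp only [pvCnt]; rw [if_neg (by omega)]
  | cons x rest ih =>
      obtain ⟨g, pr⟩ := x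
      have hg : 0 ≤ g := (hl (g, pr) (List.mem_cons_self)).1
      have hl' : pvOk rest := fun y hy => hl y (List.mem_cons_of_mem _ hy)
      simp only [pvCnt]
      rw [ih hl' _ _ h, ih hl' _ _ (by omega)]; norm_num

theorem pvCnt_nonpos (l : List (Int × Int)) (hl : pvOk l) (left j : Int) (h : j ≤ 0) :
    pvCnt l left j = pvCnt l left 0 := by
  induction l generalizing left j with
  | nil => simp only [pvCnt]; split_ifs <;> omega
  | cons x rest ih =>
      obtain ⟨g, pr⟩ := x
      have hpr : 0 ≤ pr := (hl (g, pr) (List.mem_cons_self)).2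
      have hl' : pvOk rest := fun y hy => hl y (List.mem_cons_of_mem _ hy)
      simp only [pvCnt]
      rw [ih hl' _ _ h, ih hl' (left - g) (j - pr) (by omega),
        ih hl' (left - g) (0 - pr) (by omega)]

theorem pvCnt_max0 (l : List (Int × Int)) (hl : pvOk l) (left j : Int) :
    pvCnt l left (max 0 j) = pvCnt l left j := by
  by_cases h : 0 ≤ j
  · rw [max_eq_right h]
  · rw [max_eq_left (by omega), pvCnt_nonpos l hl left j (by omega)]

theorem pvNex_neg_left (l : List (Int × Int)) (hl : pvOk l) (i need : Int) (h : i < 0) :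
    pvNex l i need = 0 := by
  induction l generalizing i need with
  | nil => simp only [pvNex]; rw [if_neg (by omega)]
  | cons x rest ih =>
      obtain ⟨g, pr⟩ := x
      have hg : 0 ≤ g := (hl (g, pr) (List.mem_cons_self)).1
      have hl' : pvOk rest := fun y hy => hl y (List.mem_cons_of_mem _ hy)
      simp only [pvNex]
      rw [ih hl' _ _ h, ih hl' _ _ (by omega)]; norm_num

theorem pvNex_nonpos (l : List (Int × Int)) (hl : pvOk l) (i j : Int) (h : j ≤ 0) :
    pvNex l i j = pvNex l i 0 := by
  induction l generalizing i j with
  | nil => simp only [pvNex]; split_ifs <;> omega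
  | cons x rest ih =>
      obtain ⟨g, pr⟩ := x
      have hpr : 0 ≤ pr := (hl (g, pr) (List.mem_cons_self)).2
      have hl' : pvOk rest := fun y hy => hl y (List.mem_cons_of_mem _ hy)
      simp only [pvNex]
      rw [ih hl' _ _ h, ih hl' (i - g) (j - pr) (by omega),
        ih hl' (i - g) (0 - pr) (by omega)]

theorem pvNex_max0 (l : List (Int × Int)) (hl : pvOk l) (i j : Int) :
    pvNex l i (max 0 j) = pvNex l i j := by
  by_cases h : 0 ≤ j
  · rw [max_eq_right h]
  · rw [max_eq_left (by omega), pvNex_nonpos l hl i j (by omega)]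

theorem pvNex_append (l : List (Int × Int)) (g pr i need : Int) :
    pvNex (l ++ [(g, pr)]) i need = pvNex l i need + pvNex l (i - g) (need - pr) := by
  induction l generalizing i need with
  | nil => simp [pvNex]
  | cons x rest ih =>
      obtain ⟨a, b⟩ := x
      simp only [List.cons_append, pvNex]
      rw [ih, ih]
      have h1 : i - a - g = i - g - a := by ring
      have h2 : need - b - pr = need - pr - b := by ring
      rw [h1, h2]; ring

theorem pvCnt_sub (l : List (Int × Int)) (i need : Int) :
    pvCnt l i need = pvCnt l (i - 1) need + pvNex l i need := by
  induction l generalizing i need with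
  | nil => simp only [pvCnt, pvNex]; split_ifs <;> omega
  | cons x rest ih =>
      obtain ⟨g, pr⟩ := x
      simp only [pvCnt, pvNex]
      rw [ih i need, ih (i - g) (need - pr)]
      have : i - g - 1 = i - 1 - g := by ring
      rw [this]; ring

theorem pvPure_eq_cnt (l : List (Int × Int)) (hl : pvOk l) (left need : Int)
    (h1 : 0 ≤ left) (h2 : 0 ≤ need) :
    pvPure l left need = pvCnt l left need % 1000000007 := by
  induction l generalizing left need with
  | nil =>
      simp only [pvPure, pvCnt]
      by_cases hz : need = 0
      · rw [if_pos (by simp [hz]), if_pos (by omega)]; norm_num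
      · rw [if_neg (by simp [hz]), if_neg (by omega)]; norm_num
  | cons x rest ih =>
      obtain ⟨g, pr⟩ := x
      have hg : 0 ≤ g := (hl (g, pr) (List.mem_cons_self)).1
      have hpr : 0 ≤ pr := (hl (g, pr) (List.mem_cons_self)).2
      have hl' : pvOk rest := fun y hy => hl y (List.mem_cons_of_mem _ hy)
      simp only [pvPure, pvCnt]
      by_cases hgl : g ≤ left
      · rw [if_pos hgl, PySem.Int.mod_eq_emod_of_pos (by norm_num),
          ih hl' left need h1 h2, ih hl' (left - g) (max 0 (need - pr)) (by omega) (le_max_left _ _),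
          pvCnt_max0 rest hl' _ _, ← Int.add_emod]
      · rw [if_neg hgl, ih hl' left need h1 h2,
          pvCnt_neg_left rest hl' (left - g) (need - pr) (by omega)]
        norm_num

-- memoization invariant: every memo entry holds the memo-free value of its key
def pvInv (items : List (Int × Int)) (memo : PySem.Dict (Int × Int × Int) Int) : Prop :=
  ∀ k left need v, memo.get? (k, left, need) = some v → v = pvPure (items.drop k.toNat) left need

theorem pvDfsB_correct (items : List (Int × Int)) (rest : List (Int × Int)) (k left need : Int)
    (memo : PySem.Dict (Int × Int × Int) Int) (hk : 0 ≤ k) (hrest : rest = items.drop k.toNat)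
    (hinv : pvInv items memo) :
    (pvDfsB 1000000007 rest k left need memo).1 = pvPure rest left need ∧
      pvInv items (pvDfsB 1000000007 rest k left need memo).2 := by
  induction rest generalizing k left need memo with
  | nil =>
      refine ⟨by simp [pvDfsB, pvPure], ?_⟩
      simpa [pvDfsB] using hinv
  | cons x rest ih =>
      obtain ⟨g, pr⟩ := x
      have hrest' : rest = items.drop (k+1).toNat := by
        have h1 : (k+1).toNat = k.toNat + 1 := by omega
        rw [h1, ← List.tail_drop, ← hrest]
        rfl
      simp only [pvDfsB]
      cases hm : memo.get? (k, left, need) with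
      | some v =>
          refine ⟨?_, hinv⟩
          have hv := hinv k left need v hm
          rw [← hrest] at hv
          simpa using hv
      | none =>
          obtain ⟨ih1a, ih1b⟩ := ih (k+1) left need memo (by omega) hrest' hinv
          by_cases hgl : g ≤ left
          · simp only [if_pos hgl]
            obtain ⟨ih2a, ih2b⟩ := ih (k+1) (left-g) (max 0 (need-pr))
              (pvDfsB 1000000007 rest (k+1) left need memo).2 (by omega) hrest' ih1b
            have hres : PySem.Int.mod ((pvDfsB 1000000007 rest (k+1) left need memo).1 +
                (pvDfsB 1000000007 rest (k+1) (left-g) (max 0 (need-pr))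
                  (pvDfsB 1000000007 rest (k+1) left need memo).2).1) 1000000007 =
                pvPure ((g, pr) :: rest) left need := by
              rw [ih1a, ih2a]; simp [pvPure, hgl]
            refine ⟨hres, ?_⟩
            intro k' l' nd' v hv
            rw [PySem.Dict.get?_insert] at hv
            by_cases hkey : (k', l', nd') = (k, left, need)
            · rw [if_pos hkey] at hv
              obtain ⟨rfl, rfl, rfl⟩ : k' = k ∧ l' = left ∧ nd' = need := by
                simpa [Prod.ext_iff] using hkey
              have hveq : v = _ := (Option.some.inj hv).symm
              rw [← hrest, ← hres]
              exact hveq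
            · rw [if_neg hkey] at hv
              exact ih2b k' l' nd' v hv
          · simp only [if_neg hgl]
            have hres : (pvDfsB 1000000007 rest (k+1) left need memo).1 =
                pvPure ((g, pr) :: rest) left need := by
              rw [ih1a]; simp [pvPure, hgl]
            refine ⟨hres, ?_⟩
            intro k' l' nd' v hv
            rw [PySem.Dict.get?_insert] at hv
            by_cases hkey : (k', l', nd') = (k, left, need)
            · rw [if_pos hkey] at hv
              obtain ⟨rfl, rfl, rfl⟩ : k' = k ∧ l' = left ∧ nd' = need := by
                simpa [Prod.ext_iff] using hkey
              have hveq : v = _ := (Option.some.inj hv).symm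
              rw [← hrest, ← hres]
              exact hveq
            · rw [if_neg hkey] at hv
              exact ih1b k' l' nd' v hv

-- ----- A-side table lemmas -----

def pvSh (dp : List (List Int)) (N P : Nat) : Prop :=
  dp.length = N ∧ ∀ row ∈ dp, row.length = P

theorem pvGetD_set {α : Type} (l : List α) (a b : Nat) (x : α) (d : α) (ha : a < l.length) :
    (l.set a x).getD b d = if a = b then x else l.getD b d := by
  rw [List.getD_eq_getElem?_getD, List.getElem?_set]
  by_cases h : a = b
  · subst h; simp [ha]
  · simp [h, List.getD_eq_getElem?_getD]

theorem pvSh_set2 (dp : List (List Int)) (N P : Nat) (h : pvSh dp N P) (i j v : Int) :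
    pvSh (pvSet2 dp i j v) N P := by
  obtain ⟨hlen, hrow⟩ := h
  by_cases hi : i.toNat < dp.length
  · refine ⟨by simp [pvSet2, hlen], ?_⟩
    intro row hm
    rcases List.mem_or_eq_of_mem_set hm with h1 | h1
    · exact hrow row h1
    · subst h1
      rw [List.length_set, List.getD_eq_getElem dp [] hi]
      exact hrow _ (List.getElem_mem hi)
  · rw [pvSet2, List.set_eq_of_length_le (by omega)]
    exact ⟨hlen, hrow⟩

theorem pvGet2_set2 (dp : List (List Int)) (N P : Nat) (h : pvSh dp N P) (i j i' j' v : Int)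
    (hi : 0 ≤ i) (hiN : i.toNat < N) (hj : 0 ≤ j) (hjP : j.toNat < P)
    (hi' : 0 ≤ i') (hj' : 0 ≤ j') :
    pvGet2 (pvSet2 dp i j v) i' j' = if i' = i ∧ j' = j then v else pvGet2 dp i' j' := by
  obtain ⟨hlen, hrow⟩ := h
  have hiL : i.toNat < dp.length := by omega
  have hrowlen : (dp.getD i.toNat []).length = P := by
    rw [List.getD_eq_getElem dp [] hiL]
    exact hrow _ (List.getElem_mem hiL)
  unfold pvGet2 pvSet2
  rw [pvGetD_set dp _ _ _ _ hiL]
  by_cases hii : i.toNat = i'.toNat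
  · rw [if_pos hii, pvGetD_set _ _ _ _ _ (by omega)]
    have hii' : i' = i := by omega
    by_cases hjj : j.toNat = j'.toNat
    · rw [if_pos hjj, if_pos ⟨hii', by omega⟩]
    · rw [if_neg hjj, if_neg (by rw [hii']; intro hc; exact hjj (by omega)), hii']
  · rw [if_neg hii, if_neg (fun hc => hii (by rw [hc.1]))]

theorem pvJloop (n p g pr : Int) (hp : 0 ≤ p) (hg : 0 ≤ g) (hpr : 0 ≤ pr)
    (i : Int) (hgi : g ≤ i) (hin : i ≤ n)
    (ov : Int → Int → Int)
    (t : Nat) (j : Int) (hj : j = (t : Int) - 1) (hjp : j ≤ p)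
    (dp : List (List Int)) (hsh : pvSh dp (n+1).toNat (p+1).toNat)
    (H1 : ∀ j', 0 ≤ j' → j' ≤ j → pvGet2 dp i j' = ov i j')
    (H2 : ∀ j', j < j' → j' ≤ p → pvGet2 dp i j' =
      PySem.Int.mod (ov i j' + ov (i-g) (max 0 (j'-pr))) 1000000007)
    (H3 : ∀ x, 0 ≤ x → x ≤ p → 1 ≤ g → pvGet2 dp (i-g) x = ov (i-g) x) :
    pvSh ((PySem.List.pyRange j (-1) (-1)).foldl (fun dp j =>
        pvSet2 dp i j (PySem.Int.mod (pvGet2 dp i j + pvGet2 dp (i-g) (max 0 (j-pr))) 1000000007)) dp) (n+1).toNat (p+1).toNat ∧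
    (∀ j', 0 ≤ j' → j' ≤ p →
      pvGet2 ((PySem.List.pyRange j (-1) (-1)).foldl (fun dp j =>
        pvSet2 dp i j (PySem.Int.mod (pvGet2 dp i j + pvGet2 dp (i-g) (max 0 (j-pr))) 1000000007)) dp) i j' =
        PySem.Int.mod (ov i j' + ov (i-g) (max 0 (j'-pr))) 1000000007) ∧
    (∀ i' j', 0 ≤ i' → 0 ≤ j' → i' ≠ i →
      pvGet2 ((PySem.List.pyRange j (-1) (-1)).foldl (fun dp j =>
        pvSet2 dp i j (PySem.Int.mod (pvGet2 dp i j + pvGet2 dp (i-g) (max 0 (j-pr))) 1000000007)) dp) i' j' = pvGet2 dp i' j') := by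
  induction t generalizing j dp with
  | zero =>
      have hj0 : j = -1 := by omega
      subst hj0
      rw [PySem.List.pyRange_neg_one_eq_nil (by omega)]
      simp only [List.foldl_nil]
      refine ⟨hsh, ?_, fun _ _ _ _ _ => trivial⟩
      intro j' hj'0 hj'p
      exact H2 j' (by omega) hj'p
  | succ t ih =>
      have hjt : j = (t : Int) := by push_cast at hj; omega
      have hj0 : 0 ≤ j := by omega
      have hi0 : 0 ≤ i := by omega
      rw [PySem.List.pyRange_neg_one_cons (by omega : (-1:Int) < j)]
      simp only [List.foldl_cons]
      have hm0 : 0 ≤ max 0 (j - pr) := le_max_left _ _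
      have hmj : max 0 (j - pr) ≤ j := by omega
      have hread2 : pvGet2 dp (i-g) (max 0 (j-pr)) = ov (i-g) (max 0 (j-pr)) := by
        by_cases hg1 : 1 ≤ g
        · exact H3 _ hm0 (by omega) hg1
        · have hgz : g = 0 := by omega
          rw [hgz, sub_zero]
          exact H1 _ hm0 (by omega)
      have hval : PySem.Int.mod (pvGet2 dp i j + pvGet2 dp (i-g) (max 0 (j-pr))) 1000000007 =
          PySem.Int.mod (ov i j + ov (i-g) (max 0 (j-pr))) 1000000007 := by
        rw [H1 j hj0 le_rfl, hread2]
      have hsh1 : pvSh (pvSet2 dp i j (PySem.Int.mod (pvGet2 dp i j + pvGet2 dp (i-g) (max 0 (j-pr))) 1000000007)) (n+1).toNat (p+1).toNat :=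
        pvSh_set2 dp _ _ hsh _ _ _
      have hset := pvGet2_set2 dp (n+1).toNat (p+1).toNat hsh i j
      obtain ⟨c1, c2, c3⟩ := ih (j - 1) (by omega) (by omega) _ hsh1
        (fun j' h0 hle => by
          rw [hset i j' _ hi0 (by omega) hj0 (by omega) hi0 h0,
            if_neg (by intro hc; omega)]
          exact H1 j' h0 (by omega))
        (fun j' hlt hle => by
          rw [hset i j' _ hi0 (by omega) hj0 (by omega) hi0 (by omega)]
          by_cases hjj : j' = j
          · rw [if_pos ⟨rfl, hjj⟩, hjj, hval]
          · rw [if_neg (by tauto)]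
            exact H2 j' (by omega) hle)
        (fun x h0 hle hg1 => by
          rw [hset (i-g) x _ hi0 (by omega) hj0 (by omega) (by omega) h0,
            if_neg (by intro hc; omega)]
          exact H3 x h0 hle hg1)
      refine ⟨c1, c2, ?_⟩
      intro i' j' h0i h0j hne
      rw [c3 i' j' h0i h0j hne,
        hset i' j' _ hi0 (by omega) hj0 (by omega) h0i h0j, if_neg (by tauto)]

theorem pvIloop (n p g pr : Int) (hp : 0 ≤ p) (hg : 0 ≤ g) (hpr : 0 ≤ pr)
    (ov : Int → Int → Int)
    (t : Nat) (i : Int) (hi : i = g - 1 + (t : Int)) (hin : i ≤ n)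
    (dp : List (List Int)) (hsh : pvSh dp (n+1).toNat (p+1).toNat)
    (Hlow : ∀ i' j', 0 ≤ i' → i' ≤ n → 0 ≤ j' → j' ≤ p → i' ≤ i → pvGet2 dp i' j' = ov i' j')
    (Hhigh : ∀ i' j', 0 ≤ i' → i' ≤ n → 0 ≤ j' → j' ≤ p → i < i' → pvGet2 dp i' j' =
      PySem.Int.mod (ov i' j' + ov (i'-g) (max 0 (j'-pr))) 1000000007) :
    pvSh ((PySem.List.pyRange i (g-1) (-1)).foldl (fun dp i =>
        (PySem.List.pyRange p (-1) (-1)).foldl (fun dp j =>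
          pvSet2 dp i j (PySem.Int.mod (pvGet2 dp i j + pvGet2 dp (i-g) (max 0 (j-pr))) 1000000007)) dp) dp) (n+1).toNat (p+1).toNat ∧
    (∀ i' j', 0 ≤ i' → i' ≤ n → 0 ≤ j' → j' ≤ p →
      pvGet2 ((PySem.List.pyRange i (g-1) (-1)).foldl (fun dp i =>
        (PySem.List.pyRange p (-1) (-1)).foldl (fun dp j =>
          pvSet2 dp i j (PySem.Int.mod (pvGet2 dp i j + pvGet2 dp (i-g) (max 0 (j-pr))) 1000000007)) dp) dp) i' j' =
        if g ≤ i' then PySem.Int.mod (ov i' j' + ov (i'-g) (max 0 (j'-pr))) 1000000007 else ov i' j') := by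
  induction t generalizing i dp with
  | zero =>
      have hig : i = g - 1 := by omega
      subst hig
      rw [PySem.List.pyRange_neg_one_eq_nil le_rfl]
      simp only [List.foldl_nil]
      refine ⟨hsh, ?_⟩
      intro i' j' h0i hni h0j hpj
      by_cases hgi' : g ≤ i'
      · rw [if_pos hgi']
        exact Hhigh i' j' h0i hni h0j hpj (by omega)
      · rw [if_neg hgi']
        exact Hlow i' j' h0i hni h0j hpj (by omega)
  | succ t ih =>
      have hgei : g ≤ i := by omega
      have h0i : 0 ≤ i := by omega
      rw [PySem.List.pyRange_neg_one_cons (by omega : g - 1 < i)]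
      simp only [List.foldl_cons]
      obtain ⟨sh1, rowi, others⟩ := pvJloop n p g pr hp hg hpr i hgei hin ov ((p+1).toNat) p
        (by omega) le_rfl dp hsh
        (fun j' h0 _ => Hlow i j' h0i hin h0 (by omega) le_rfl)
        (fun j' h1 h2 => absurd h1 (by omega))
        (fun x h0 hxp hg1 => Hlow (i-g) x (by omega) (by omega) h0 hxp (by omega))
      exact ih (i - 1) (by omega) (by omega) _ sh1
        (fun i' j' h0i' hni h0j hpj hle => by
          rw [others i' j' h0i' h0j (by omega)]
          exact Hlow i' j' h0i' hni h0j hpj (by omega))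
        (fun i' j' h0i' hni h0j hpj hlt => by
          by_cases hii : i' = i
          · subst hii
            exact rowi j' h0j hpj
          · rw [others i' j' h0i' h0j hii]
            exact Hhigh i' j' h0i' hni h0j hpj (by omega))

theorem pvItemPass (n p g pr : Int) (_hn : 0 ≤ n) (hp : 0 ≤ p) (hg : 0 ≤ g) (hpr : 0 ≤ pr)
    (ov : Int → Int → Int)
    (dp : List (List Int)) (hsh : pvSh dp (n+1).toNat (p+1).toNat)
    (Hov : ∀ i' j', 0 ≤ i' → i' ≤ n → 0 ≤ j' → j' ≤ p → pvGet2 dp i' j' = ov i' j') :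
    pvSh ((PySem.List.pyRange n (g-1) (-1)).foldl (fun dp i =>
        (PySem.List.pyRange p (-1) (-1)).foldl (fun dp j =>
          pvSet2 dp i j (PySem.Int.mod (pvGet2 dp i j + pvGet2 dp (i-g) (max 0 (j-pr))) 1000000007)) dp) dp) (n+1).toNat (p+1).toNat ∧
    (∀ i' j', 0 ≤ i' → i' ≤ n → 0 ≤ j' → j' ≤ p →
      pvGet2 ((PySem.List.pyRange n (g-1) (-1)).foldl (fun dp i =>
        (PySem.List.pyRange p (-1) (-1)).foldl (fun dp j =>
          pvSet2 dp i j (PySem.Int.mod (pvGet2 dp i j + pvGet2 dp (i-g) (max 0 (j-pr))) 1000000007)) dp) dp) i' j' =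
        if g ≤ i' then PySem.Int.mod (ov i' j' + ov (i'-g) (max 0 (j'-pr))) 1000000007 else ov i' j') := by
  by_cases hgn : g ≤ n
  · exact pvIloop n p g pr hp hg hpr ov ((n - (g-1)).toNat) n (by omega) le_rfl dp hsh
      (fun i' j' a b c d _ => Hov i' j' a b c d)
      (fun i' j' a b c d hlt => absurd hlt (by omega))
  · rw [PySem.List.pyRange_neg_one_eq_nil (a := n) (b := g - 1) (by omega)]
    simp only [List.foldl_nil]
    refine ⟨hsh, ?_⟩
    intro i' j' a b c d
    rw [if_neg (by omega)]
    exact Hov i' j' a b c d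

theorem pvKloop (n p : Int) (group profit : List Int) (hn : 0 ≤ n) (hp : 0 ≤ p)
    (hlen : profit.length ≤ group.length)
    (hOk : pvOk (pvItems group profit))
    (t : Nat) (ht : t ≤ profit.length) :
    pvSh ((PySem.List.pyRange 1 ((t : Int) + 1) 1).foldl (fun dp k =>
      let g := PySem.List.pyGetD group (k-1) 0
      let pr := PySem.List.pyGetD profit (k-1) 0
      (PySem.List.pyRange n (g-1) (-1)).foldl (fun dp i =>
        (PySem.List.pyRange p (-1) (-1)).foldl (fun dp j =>
          pvSet2 dp i j (PySem.Int.mod (pvGet2 dp i j + pvGet2 dp (i-g) (max 0 (j-pr))) 1000000007)) dp) dp)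
      (pvSet2 (List.replicate (n+1).toNat (List.replicate (p+1).toNat 0)) 0 0 1)) (n+1).toNat (p+1).toNat ∧
    (∀ i j, 0 ≤ i → i ≤ n → 0 ≤ j → j ≤ p →
      pvGet2 ((PySem.List.pyRange 1 ((t : Int) + 1) 1).foldl (fun dp k =>
        let g := PySem.List.pyGetD group (k-1) 0
        let pr := PySem.List.pyGetD profit (k-1) 0
        (PySem.List.pyRange n (g-1) (-1)).foldl (fun dp i =>
          (PySem.List.pyRange p (-1) (-1)).foldl (fun dp j =>
            pvSet2 dp i j (PySem.Int.mod (pvGet2 dp i j + pvGet2 dp (i-g) (max 0 (j-pr))) 1000000007)) dp) dp)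
        (pvSet2 (List.replicate (n+1).toNat (List.replicate (p+1).toNat 0)) 0 0 1)) i j =
        pvNex ((pvItems group profit).take t) i j % 1000000007) := by
  have hsh0 : pvSh (List.replicate (n+1).toNat (List.replicate (p+1).toNat 0)) (n+1).toNat (p+1).toNat := by
    refine ⟨List.length_replicate, ?_⟩
    intro row hr
    rw [List.eq_of_mem_replicate hr, List.length_replicate]
  have hsh1 : pvSh (pvSet2 (List.replicate (n+1).toNat (List.replicate (p+1).toNat 0)) 0 0 1) (n+1).toNat (p+1).toNat :=
    pvSh_set2 _ _ _ hsh0 _ _ _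
  have hitslen : (pvItems group profit).length = profit.length := by
    simp only [pvItems, List.length_take, List.length_zip]
    omega
  induction t with
  | zero =>
      rw [show ((0:Nat):Int) + 1 = 1 by norm_num, PySem.List.pyRange_one_eq_nil le_rfl]
      simp only [List.foldl_nil, List.take_zero]
      refine ⟨hsh1, ?_⟩
      intro i j h0i hni h0j hpj
      rw [pvGet2_set2 _ _ _ hsh0 0 0 i j 1 le_rfl (by omega) le_rfl (by omega) h0i h0j]
      by_cases hij : i = 0 ∧ j = 0
      · rw [if_pos hij]
        simp only [pvNex]
        rw [if_pos ⟨hij.1, by omega⟩]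
        norm_num
      · rw [if_neg hij]
        simp only [pvNex]
        rw [if_neg (by omega)]
        unfold pvGet2
        have hrow0 : (List.replicate (n+1).toNat (List.replicate (p+1).toNat 0)).getD i.toNat [] =
            List.replicate (p+1).toNat (0:Int) := List.getD_replicate _ (by omega)
        rw [hrow0, List.getD_replicate _ (by omega)]
        norm_num
  | succ t ih =>
      obtain ⟨ihSh, ihVal⟩ := ih (by omega)
      have htp : t < profit.length := by omega
      have htg : t < group.length := by omega
      have htits : t < (pvItems group profit).length := by omega
      have hitem : (pvItems group profit)[t] = (group[t], profit[t]) := by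
        simp [pvItems, List.getElem_take, List.getElem_zip]
      have hg0 : 0 ≤ group[t] ∧ 0 ≤ profit[t] := by
        have := hOk _ (List.getElem_mem htits)
        rwa [hitem] at this
      have hOkt : pvOk ((pvItems group profit).take t) :=
        fun y hy => hOk y (List.mem_of_mem_take hy)
      have htake : (pvItems group profit).take (t+1) =
          (pvItems group profit).take t ++ [(group[t], profit[t])] := by
        rw [List.take_add_one, List.getElem?_eq_getElem htits, hitem]
        rfl
      rw [show ((t+1:Nat):Int) + 1 = ((t : Int) + 1) + 1 by push_cast; ring,
        PySem.List.pyRange_one_succ_right (by omega), List.foldl_append]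
      simp only [List.foldl_cons, List.foldl_nil]
      rw [show (t : Int) + 1 - 1 = (t : Int) by ring, PySem.List.pyGetD_natCast,
        PySem.List.pyGetD_natCast, List.getD_eq_getElem _ _ htg, List.getD_eq_getElem _ _ htp]
      obtain ⟨c1, c2⟩ := pvItemPass n p group[t] profit[t] hn hp hg0.1 hg0.2
        (fun i j => pvNex ((pvItems group profit).take t) i j % 1000000007) _ ihSh ihVal
      refine ⟨c1, ?_⟩
      intro i j h0i hni h0j hpj
      rw [c2 i j h0i hni h0j hpj, htake, pvNex_append]
      by_cases hgi : group[t] ≤ i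
      · rw [if_pos hgi, PySem.Int.mod_eq_emod_of_pos (by norm_num),
          pvNex_max0 _ hOkt _ _, ← Int.add_emod]
      · rw [if_neg hgi,
          pvNex_neg_left _ hOkt (i - group[t]) (j - profit[t]) (by omega)]
        norm_num

theorem pvResLoop (n p : Int) (items : List (Int × Int)) (hOk : pvOk items)
    (dp : List (List Int))
    (Hval : ∀ i, 0 ≤ i → i ≤ n → pvGet2 dp i p = pvNex items i p % 1000000007)
    (t : Nat) (ht : (t : Int) ≤ n + 1) :
    (PySem.List.pyRange 0 (t : Int) 1).foldl
      (fun res i => PySem.Int.mod (res + pvGet2 dp i p) 1000000007) 0 =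
      pvCnt items ((t : Int) - 1) p % 1000000007 := by
  induction t with
  | zero =>
      rw [show ((0:Nat):Int) = 0 by norm_num, PySem.List.pyRange_one_eq_nil le_rfl]
      simp only [List.foldl_nil]
      rw [pvCnt_neg_left items hOk _ _ (by omega)]
      norm_num
  | succ t ih =>
      rw [show ((t+1:Nat):Int) = (t : Int) + 1 by push_cast; ring,
        PySem.List.pyRange_one_succ_right (by omega), List.foldl_append]
      simp only [List.foldl_cons, List.foldl_nil]
      rw [ih (by omega), Hval (t : Int) (by omega) (by omega),
        PySem.Int.mod_eq_emod_of_pos (by norm_num), ← Int.add_emod,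
        show (t : Int) + 1 - 1 = (t : Int) by ring,
        pvCnt_sub items (t : Int) p]

theorem pvA_eq (n minProfit : Int) (group profit : List Int)
    (hpre : Pre_profitableSchemesStateCompression n minProfit group profit) :
    profitableSchemesStateCompression n minProfit group profit =
      pvCnt (pvItems group profit) n minProfit % 1000000007 := by
  obtain ⟨hn, hp, hlen, hgr, hprf⟩ := hpre
  have hOk : pvOk (pvItems group profit) := by
    intro x hx
    have hx' := List.mem_of_mem_take hx
    obtain ⟨a, b⟩ := x
    have := List.of_mem_zip hx'
    exact ⟨hgr a this.1, hprf b this.2⟩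
  have hitslen : (pvItems group profit).length = profit.length := by
    simp only [pvItems, List.length_take, List.length_zip]
    omega
  obtain ⟨_, hval⟩ := pvKloop n minProfit group profit hn hp hlen hOk profit.length le_rfl
  rw [List.take_of_length_le (by omega)] at hval
  have hres := pvResLoop n minProfit (pvItems group profit) hOk _
    (fun i h0 hni => hval i minProfit h0 hni hp le_rfl) (n+1).toNat (by omega)
  rw [show (((n+1).toNat : Nat) : Int) = n + 1 by omega] at hres
  unfold profitableSchemesStateCompression
  rw [hres, show n + 1 - 1 = n by ring]

theorem pvB_eq (n minProfit : Int) (group profit : List Int)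
    (hpre : Pre_profitableSchemesStateCompression n minProfit group profit) :
    profitableSchemesStateCompression_alt n minProfit group profit =
      pvCnt (pvItems group profit) n minProfit % 1000000007 := by
  obtain ⟨hn, hp, hlen, hgr, hprf⟩ := hpre
  have hOk : pvOk (pvItems group profit) := by
    intro x hx
    have hx' := List.mem_of_mem_take hx
    obtain ⟨a, b⟩ := x
    have := List.of_mem_zip hx'
    exact ⟨hgr a this.1, hprf b this.2⟩
  obtain ⟨h1, _⟩ := pvDfsB_correct (pvItems group profit) (pvItems group profit) 0 n minProfit
    PySem.Dict.empty le_rfl (by simp)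
    (fun k l nd v hv => by rw [PySem.Dict.get?_empty] at hv; cases hv)
  unfold profitableSchemesStateCompression_alt
  rw [h1, pvPure_eq_cnt _ hOk _ _ hn hp]

-- ===== VERDICT (by name: the statement is the Claim_ definition above) =====
theorem profitableSchemesStateCompression_spec : Claim_equal_profitableSchemesStateCompression := by
  intro n minProfit group profit _ hpre
  unfold Spec_profitableSchemesStateCompression
  rw [pvA_eq n minProfit group profit hpre, pvB_eq n minProfit group profit hpre]
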